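-- pv_equiv track=rewrite | github.com/mayank0405/DSA-Basics | Mathematics/GP_term.py | gp_term
-- ===== SOURCE A (Python) =====
-- def gp_term(first: int, second: int, n: int):
--     if n == 0:
--         return 0
--     d = second//first
--     i = 1
--     ans = 1
--     while i<=n:
--         ans *= d
--         i +=1
--     return ans
-- ===== SOURCE B (Python) =====
-- def gp_term(first: int, second: int, n: int):
--     if n == 0:
--         return 0
--     d = second // first
--     def power(base, e):
--         if e <= 0:
--             return 1
--         half = power(base, e // 2)
--         if e % 2 == 0:
--             return half * half
--         return half * half * base
--     return power(d, n)
-- ===== Notes on version B (the rewrite author's own statement) =====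
-- stated objective: faster
-- what changed: Replaces the linear multiplication loop by recursive exponentiation-by-squaring, O(log n) instead of O(n) multiplications (intended as faster; a timing run measured ratios of 100x+ at the largest sizes).
import Mathlib
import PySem

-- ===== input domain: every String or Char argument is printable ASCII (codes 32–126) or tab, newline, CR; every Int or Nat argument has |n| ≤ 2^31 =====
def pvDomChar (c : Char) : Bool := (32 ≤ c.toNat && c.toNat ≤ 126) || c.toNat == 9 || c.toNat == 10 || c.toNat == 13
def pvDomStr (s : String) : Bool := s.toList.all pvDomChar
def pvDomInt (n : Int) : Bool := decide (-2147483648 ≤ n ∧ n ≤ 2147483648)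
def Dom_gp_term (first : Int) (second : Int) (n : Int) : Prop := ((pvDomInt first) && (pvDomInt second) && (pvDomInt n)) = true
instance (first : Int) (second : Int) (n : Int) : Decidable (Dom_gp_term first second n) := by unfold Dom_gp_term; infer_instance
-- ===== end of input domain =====

-- B replaces A's linear multiplication loop by exponentiation-by-squaring: O(log n) instead of O(n) multiplications (intended as faster; measured ≥100× at the probe's largest size).

-- ===== PORT A =====
-- A's while-loop: while i <= n: ans *= d; i += 1
def gpLoopA (d n i ans : Int) : Int :=
  if i ≤ n then gpLoopA d n (i + 1) (ans * d) else ans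
termination_by (n + 1 - i).toNat
decreasing_by omega

def gp_term (first : Int) (second : Int) (n : Int) : Int :=
  if n = 0 then 0
  else gpLoopA (PySem.Int.floordiv second first) n 1 1

-- ===== PORT B =====
-- Source B's helper power(base, e): exponentiation by squaring
def gpPowB (base e : Int) : Int :=
  if e ≤ 0 then 1
  else
    let half := gpPowB base (PySem.Int.floordiv e 2)
    if PySem.Int.mod e 2 = 0 then half * half else half * half * base
termination_by e.toNat
decreasing_by
  rw [PySem.Int.floordiv_eq_ediv_of_pos (by omega)]
  omega

def gp_term_alt (first : Int) (second : Int) (n : Int) : Int :=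
  if n = 0 then 0
  else gpPowB (PySem.Int.floordiv second first) n

-- ===== PRECONDITION & SPEC =====
-- Pre_ excludes first = 0 with n ≠ 0, exactly where Python's second // first raises ZeroDivisionError (n = 0 returns before the division).
def Pre_gp_term (first : Int) (_second : Int) (n : Int) : Prop := first ≠ 0 ∨ n = 0
instance (first : Int) (second : Int) (n : Int) : Decidable (Pre_gp_term first second n) := by unfold Pre_gp_term; infer_instance
def pvWitness_gp_term : Int × Int × Int := (2, 6, 3)

def Spec_gp_term (first : Int) (second : Int) (n : Int) (out : Int) : Prop := out = gp_term_alt first second n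
instance (first : Int) (second : Int) (n : Int) (out : Int) : Decidable (Spec_gp_term first second n out) := by unfold Spec_gp_term; infer_instance

-- ===== CLAIM (what is proved, stated in full; the proofs are below) =====
def Claim_equal_gp_term : Prop := ∀ (first : Int) (second : Int) (n : Int), Dom_gp_term first second n → Pre_gp_term first second n → Spec_gp_term first second n (gp_term first second n)

-- ===== LEMMAS AND PROOFS =====

theorem gpLoopA_eq (k : Nat) : ∀ (d n i ans : Int), (n + 1 - i).toNat = k → gpLoopA d n i ans = ans * d ^ k := by
  induction k with
  | zero =>
    intro d n i ans hk
    rw [gpLoopA, if_neg (by omega)]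
    simp
  | succ k ih =>
    intro d n i ans hk
    rw [gpLoopA, if_pos (by omega)]
    rw [ih d n (i + 1) (ans * d) (by omega)]
    ring

theorem gpPowB_eq (base : Int) (k : Nat) : ∀ (e : Int), e.toNat = k → gpPowB base e = base ^ k := by
  induction k using Nat.strong_induction_on with
  | _ k ih =>
    intro e hk
    rw [gpPowB]
    by_cases h : e ≤ 0
    · rw [if_pos h]
      have : k = 0 := by omega
      simp [this]
    · rw [if_neg h]
      have h2 : PySem.Int.floordiv e 2 = e / 2 := PySem.Int.floordiv_eq_ediv_of_pos (by omega)
      have hm : PySem.Int.mod e 2 = e % 2 := PySem.Int.mod_eq_emod_of_pos (by omega)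
      have hlt : (e / 2).toNat < k := by omega
      have hih : gpPowB base (e / 2) = base ^ ((e / 2).toNat) := ih ((e / 2).toNat) hlt (e / 2) rfl
      rw [h2, hm, hih]
      have hdm : 2 * (e / 2) + e % 2 = e := Int.ediv_mul_add_emod e 2 ▸ by omega
      by_cases hpar : e % 2 = 0
      · rw [if_pos hpar, ← pow_add]
        congr 1
        omega
      · rw [if_neg hpar, ← pow_add, ← pow_succ]
        congr 1
        omega

-- ===== VERDICT (by name: the statement is the Claim_ definition above) =====
theorem gp_term_spec : Claim_equal_gp_term := by
  intro first second n _ _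
  unfold Spec_gp_term gp_term gp_term_alt
  by_cases hn : n = 0
  · simp [hn]
  · rw [if_neg hn, if_neg hn]
    rw [gpLoopA_eq (n.toNat) _ n 1 1 (by omega)]
    rw [gpPowB_eq _ (n.toNat) n rfl]
    ring
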